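-- pv_equiv track=rewrite | github.com/behzad1978/public-chatterbox-core | src/twitter_param_check_5.py | remove_duplicate_tweets
-- ===== SOURCE A (Python) =====
-- def remove_duplicate_tweets(tweets_list):
--     return_list = []
--     while len(tweets_list) > 0:
--         t = tweets_list[0]
--         #using the quick_ratio() is very time consuming!
--         #duplicates = [s for s in tweets_list if difflib.SequenceMatcher(None, s, t).quick_ratio() > 0.90]
--         duplicates = [s for s in tweets_list if s==t]
--         return_list.append([t, len(duplicates)])
--         tweets_list = [x for x in tweets_list if x not in duplicates]
-- #        if len(duplicates)>1:
-- #            print 'stop for debugging purpose'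
--     return return_list
-- ===== SOURCE B (Python) =====
-- def remove_duplicate_tweets(tweets_list):
--     counts = {}
--     for t in tweets_list:
--         counts[t] = counts.get(t, 0) + 1
--     return [[t, c] for t, c in counts.items()]
-- ===== Notes on version B (the rewrite author's own statement) =====
-- stated objective: faster
-- what changed: Replaced the quadratic while-loop that repeatedly scans and rebuilds the remaining list with a single pass building an insertion-ordered count dictionary, then emitting its items.
import Mathlib
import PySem

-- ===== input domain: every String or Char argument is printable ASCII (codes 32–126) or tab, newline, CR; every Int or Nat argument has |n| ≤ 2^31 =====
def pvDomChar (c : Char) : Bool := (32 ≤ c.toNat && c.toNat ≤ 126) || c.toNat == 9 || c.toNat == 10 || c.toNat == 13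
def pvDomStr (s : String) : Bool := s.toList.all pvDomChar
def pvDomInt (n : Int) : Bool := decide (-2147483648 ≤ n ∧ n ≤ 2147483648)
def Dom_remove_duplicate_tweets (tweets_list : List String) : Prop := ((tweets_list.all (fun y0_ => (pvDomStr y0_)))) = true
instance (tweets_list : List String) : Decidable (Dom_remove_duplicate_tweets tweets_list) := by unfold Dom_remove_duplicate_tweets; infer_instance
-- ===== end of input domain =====

-- B replaces A's quadratic scan-and-filter while-loop with a one-pass counting dictionary (objective: faster).

-- ===== PORT A =====
-- A's while-loop: pop the head, count its equals, drop them, append [t, count].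
def remove_duplicate_tweets_loop (tweets_list : List String) (return_list : List (String × Int)) : List (String × Int) :=
  match tweets_list with
  | [] => return_list
  | t :: rest =>
    let duplicates := (t :: rest).filter (fun s => s == t)
    let return_list' := return_list ++ [(t, (duplicates.length : Int))]
    let tweets_list' := (t :: rest).filter (fun x => !(duplicates.contains x))
    remove_duplicate_tweets_loop tweets_list' return_list'
termination_by tweets_list.length
decreasing_by
  calc (List.filter (fun x => !(List.filter (fun s => s == t) (t :: rest)).contains x) (t :: rest)).length
      = (List.filter (fun x => !(List.filter (fun s => s == t) (t :: rest)).contains x) rest).length := by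
        rw [List.filter_cons]
        simp
    _ ≤ rest.length := List.length_filter_le _ _
    _ < (t :: rest).length := by simp

def remove_duplicate_tweets (tweets_list : List String) : List (String × Int) :=
  remove_duplicate_tweets_loop tweets_list []

-- ===== PORT B =====
-- B: counts = {}; for t: counts[t] = counts.get(t, 0) + 1; return list(counts.items()).
def remove_duplicate_tweets_alt (tweets_list : List String) : List (String × Int) :=
  (tweets_list.foldl (fun d t => d.insert t (d.getD t 0 + 1)) PySem.Dict.empty).items

-- ===== PRECONDITION & SPEC =====
def Spec_remove_duplicate_tweets (tweets_list : List String) (out : List (String × Int)) : Prop := out = remove_duplicate_tweets_alt tweets_list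
instance (tweets_list : List String) (out : List (String × Int)) : Decidable (Spec_remove_duplicate_tweets tweets_list out) := by unfold Spec_remove_duplicate_tweets; infer_instance

-- ===== CLAIM (what is proved, stated in full; the proofs are below) =====
def Claim_equal_remove_duplicate_tweets : Prop := ∀ (tweets_list : List String), Dom_remove_duplicate_tweets tweets_list → Spec_remove_duplicate_tweets tweets_list (remove_duplicate_tweets tweets_list)

-- ===== LEMMAS AND PROOFS =====

-- adding elements already marked as present keeps a fold over Set.add unchanged
theorem foldl_add_filter (t : String) : ∀ (l s : List String), t ∈ s →
    l.foldl PySem.Set.add s = (l.filter (fun x => !(x == t))).foldl PySem.Set.add s := by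
  intro l
  induction l with
  | nil => intro s _; rfl
  | cons x l ih =>
    intro s hs
    by_cases hx : x = t
    · subst hx
      have hadd : PySem.Set.add s x = s := by simp [PySem.Set.add, hs]
      simp only [List.foldl_cons, List.filter_cons, hadd]
      simpa using ih s hs
    · have hkeep : (!(x == t)) = true := by simp [hx]
      simp only [List.foldl_cons, List.filter_cons, hkeep]
      apply ih
      simp only [PySem.Set.add]
      split
      · exact hs
      · exact List.mem_append_left _ hs

-- a fold over Set.add starting from t :: s, with t absent from the input, keeps t in front
theorem foldl_add_cons (t : String) : ∀ (l s : List String), t ∉ l →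
    l.foldl PySem.Set.add (t :: s) = t :: l.foldl PySem.Set.add s := by
  intro l
  induction l with
  | nil => intro s _; rfl
  | cons x l ih =>
    intro s hl
    have hx : ¬(x = t) := fun h => hl (by simp [h])
    have hcons : PySem.Set.add (t :: s) x = t :: PySem.Set.add s x := by
      simp only [PySem.Set.add, PySem.Set.contains, List.contains_cons,
        (by simp [hx] : (x == t) = false), Bool.false_or]
      split <;> simp
    simp only [List.foldl_cons, hcons]
    exact ih _ (fun h => hl (List.mem_cons_of_mem _ h))

theorem ofList_cons_filter (t : String) (rest : List String) :
    PySem.Set.ofList (t :: rest) = t :: PySem.Set.ofList (rest.filter (fun x => !(x == t))) := by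
  rw [PySem.Set.ofList_eq_foldl, PySem.Set.ofList_eq_foldl]
  simp only [List.foldl_cons]
  have h0 : PySem.Set.add [] t = [t] := by simp [PySem.Set.add]
  rw [h0, foldl_add_filter t rest [t] (by simp)]
  exact foldl_add_cons t _ [] (by simp [List.mem_filter])

theorem contains_duplicates (t : String) (rest : List String) (x : String) :
    ((t :: rest).filter (fun s => s == t)).contains x = (x == t) := by
  by_cases h : x = t
  · subst h
    rw [beq_self_eq_true]
    exact List.contains_iff_mem.mpr (List.mem_filter.mpr ⟨List.mem_cons_self, by simp⟩)
  · have hnm : x ∉ (t :: rest).filter (fun s => s == t) := by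
      intro hmem
      exact h (by simpa using (List.mem_filter.mp hmem).2)
    rw [(by simp [h] : (x == t) = false)]
    exact Bool.eq_false_iff.mpr (fun hb => hnm (List.contains_iff_mem.mp hb))

theorem filtered_eq (t : String) (rest : List String) :
    (t :: rest).filter (fun x => !(((t :: rest).filter (fun s => s == t)).contains x))
      = rest.filter (fun x => !(x == t)) := by
  simp only [contains_duplicates]
  rw [List.filter_cons]
  simp

theorem loop_canonical : ∀ (l : List String) (acc : List (String × Int)),
    remove_duplicate_tweets_loop l acc
      = acc ++ (PySem.Set.ofList l).map (fun k => (k, (l.count k : Int)))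
  | [], acc => by simp [remove_duplicate_tweets_loop, PySem.Set.ofList]
  | t :: rest, acc => by
    rw [remove_duplicate_tweets_loop]
    simp only [filtered_eq]
    rw [loop_canonical (rest.filter (fun x => !(x == t))) _]
    rw [ofList_cons_filter]
    simp only [List.map_cons, List.append_assoc, List.singleton_append]
    congr 2
    · congr 1
      rw [← List.count_eq_length_filter]
    · apply List.map_congr_left
      intro k hk
      have hkt : ¬(k = t) := by
        have := (PySem.Set.mem_ofList _ _).mp hk
        have := (List.mem_filter.mp this).2
        simp at this
        intro h; exact this h
      congr 1
      rw [List.count_filter (by simp [hkt])]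
      simp [Ne.symm hkt]
  termination_by l => l.length
  decreasing_by
    simp only [List.length_cons]
    exact Nat.lt_succ_of_le (List.length_filter_le _ _)

-- ===== VERDICT (by name: the statement is the Claim_ definition above) =====
theorem remove_duplicate_tweets_spec : Claim_equal_remove_duplicate_tweets := by
  intro l _
  unfold Spec_remove_duplicate_tweets remove_duplicate_tweets remove_duplicate_tweets_alt
  rw [loop_canonical, PySem.Dict.foldl_insert_getD_add_one_eq_counter, PySem.Dict.items_counter]
  simp
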